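-- pv_equiv track=rewrite | github.com/MontrealCorpusTools/PolyglotDB | polyglotdb/io/importer/from_csv.py | make_path_safe
-- ===== SOURCE A (Python) =====
-- def make_path_safe(path):
--     """Takes a path and returns it with the associated Javascript URL-safe characters"""
--     replacements = [
--         ("%", "%25"),
--         ("\\", "/"),
--         (" ", "%20"),
--         ("'", "\\'"),
--         ("?", "%3F"),
--         (";", "%3B"),
--         ("<", "%3C"),
--         ("=", "%3D"),
--         (">", "%3E"),
--         (":", "%3A"),
--         ("*", "%2A"),
--         ("&", "%26"),
--         ("(", "%28"),
--         (")", "%29"),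
--         ("@", "%40"),
--         ("!", "%21"),
--         ("#", "%23"),
--     ]
--     for o, r in replacements:
--         path = path.replace(o, r)
--     return path
-- ===== SOURCE B (Python) =====
-- _TRANS = str.maketrans({
--     "%": "%25", "\\": "/", " ": "%20", "'": "\\'",
--     "?": "%3F", ";": "%3B", "<": "%3C", "=": "%3D",
--     ">": "%3E", ":": "%3A", "*": "%2A", "&": "%26",
--     "(": "%28", ")": "%29", "@": "%40", "!": "%21", "#": "%23",
-- })
--
--
-- def make_path_safe(path):
--     """Takes a path and returns it with the associated Javascript URL-safe characters"""
--     return path.translate(_TRANS)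
-- ===== Notes on version B (the rewrite author's own statement) =====
-- stated objective: idiomatic
-- what changed: Replaces 17 sequential str.replace passes over the string with a single str.maketrans translation table applied in one path.translate pass; equivalent because A's ordered replaces never re-process inserted characters.
import Mathlib
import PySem

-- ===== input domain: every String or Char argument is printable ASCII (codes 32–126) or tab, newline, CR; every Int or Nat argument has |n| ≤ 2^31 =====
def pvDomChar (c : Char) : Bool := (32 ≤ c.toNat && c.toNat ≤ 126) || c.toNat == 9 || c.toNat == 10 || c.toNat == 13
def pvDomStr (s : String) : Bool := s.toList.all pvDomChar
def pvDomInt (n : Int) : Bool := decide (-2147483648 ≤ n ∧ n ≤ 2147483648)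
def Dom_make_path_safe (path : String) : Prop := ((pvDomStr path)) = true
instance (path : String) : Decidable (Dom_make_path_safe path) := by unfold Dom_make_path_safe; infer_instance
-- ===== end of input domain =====

-- B replaces A's 17 sequential str.replace scans with one table-driven pass (str.maketrans/translate); return value proved equal.

-- ===== PORT A =====

def make_path_safe (path : String) : String :=
  let replacements : List (String × String) :=
    [("%", "%25"), ("\\", "/"), (" ", "%20"), ("'", "\\'"), ("?", "%3F"),
     (";", "%3B"), ("<", "%3C"), ("=", "%3D"), (">", "%3E"), (":", "%3A"),
     ("*", "%2A"), ("&", "%26"), ("(", "%28"), (")", "%29"), ("@", "%40"),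
     ("!", "%21"), ("#", "%23")]
  replacements.foldl (fun p pr => PySem.Str.replace p pr.1 pr.2) path


-- ===== PORT B =====
-- the translation table of Source B as a per-char lookup (dict from char to replacement string)
def mpsTable (c : Char) : List Char :=
  if c = '%' then ['%','2','5'] else if c = '\\' then ['/']
  else if c = ' ' then ['%','2','0'] else if c = '\'' then ['\\','\'']
  else if c = '?' then ['%','3','F'] else if c = ';' then ['%','3','B']
  else if c = '<' then ['%','3','C'] else if c = '=' then ['%','3','D']
  else if c = '>' then ['%','3','E'] else if c = ':' then ['%','3','A']
  else if c = '*' then ['%','2','A'] else if c = '&' then ['%','2','6']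
  else if c = '(' then ['%','2','8'] else if c = ')' then ['%','2','9']
  else if c = '@' then ['%','4','0'] else if c = '!' then ['%','2','1']
  else if c = '#' then ['%','2','3'] else [c]

def make_path_safe_alt (path : String) : String :=
  String.ofList (path.toList.flatMap mpsTable)


-- ===== PRECONDITION & SPEC =====
def Spec_make_path_safe (path : String) (out : String) : Prop := out = make_path_safe_alt path
instance (path : String) (out : String) : Decidable (Spec_make_path_safe path out) := by unfold Spec_make_path_safe; infer_instance

-- ===== CLAIM (what is proved, stated in full; the proofs are below) =====
def Claim_equal_make_path_safe : Prop := ∀ (path : String), Dom_make_path_safe path → Spec_make_path_safe path (make_path_safe path)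

-- ===== LEMMAS AND PROOFS =====
theorem go_spec (o : Char) (r : List Char) (fuel : Nat) (l acc : List Char)
    (h : l.length ≤ fuel) :
    PySem.Chars.replace.go [o] r fuel l acc
      = acc.reverse ++ l.flatMap (fun c => if c = o then r else [c]) := by
  induction fuel generalizing l acc with
  | zero =>
    have : l = [] := List.eq_nil_of_length_eq_zero (Nat.le_zero.mp h)
    subst this
    simp [PySem.Chars.replace.go]
  | succ n ih =>
    cases l with
    | nil => simp [PySem.Chars.replace.go]
    | cons c t =>
      simp only [PySem.Chars.replace.go]
      by_cases hc : c = o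
      · subst hc
        simp only [List.isPrefixOf]
        rw [if_pos (by simp)]
        rw [ih _ _ (by simpa using Nat.le_of_succ_le_succ h)]
        simp
      · rw [if_neg (by simp [List.isPrefixOf, Ne.symm hc])]
        rw [ih _ _ (by simpa using Nat.le_of_succ_le_succ h)]
        simp [hc]

theorem replace_single (s : List Char) (o : Char) (r : List Char) :
    PySem.Chars.replace s [o] r = s.flatMap (fun c => if c = o then r else [c]) := by
  simp [PySem.Chars.replace, go_spec o r s.length s [] le_rfl, List.isEmpty]

def chainA (L : List Char) : List Char :=
  PySem.Chars.replace (PySem.Chars.replace (PySem.Chars.replace (PySem.Chars.replace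
  (PySem.Chars.replace (PySem.Chars.replace (PySem.Chars.replace (PySem.Chars.replace
  (PySem.Chars.replace (PySem.Chars.replace (PySem.Chars.replace (PySem.Chars.replace
  (PySem.Chars.replace (PySem.Chars.replace (PySem.Chars.replace (PySem.Chars.replace
  (PySem.Chars.replace L
    ['%'] ['%','2','5']) ['\\'] ['/']) [' '] ['%','2','0']) ['\''] ['\\','\''])
    ['?'] ['%','3','F']) [';'] ['%','3','B']) ['<'] ['%','3','C']) ['='] ['%','3','D'])
    ['>'] ['%','3','E']) [':'] ['%','3','A']) ['*'] ['%','2','A']) ['&'] ['%','2','6'])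
    ['('] ['%','2','8']) [')'] ['%','2','9']) ['@'] ['%','4','0']) ['!'] ['%','2','1'])
    ['#'] ['%','2','3']

theorem toList_A (path : String) : (make_path_safe path).toList = chainA path.toList := by
  simp only [make_path_safe, List.foldl, PySem.Str.toList_replace]
  rfl

theorem chainA_append (a b : List Char) : chainA (a ++ b) = chainA a ++ chainA b := by
  simp [chainA, replace_single, List.flatMap_append]

theorem chainA_single (c : Char) : chainA [c] = mpsTable c := by
  by_cases h1 : c = '%'; · subst h1; decide
  by_cases h2 : c = '\\'; · subst h2; decide
  by_cases h3 : c = ' '; · subst h3; decide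
  by_cases h4 : c = '\''; · subst h4; decide
  by_cases h5 : c = '?'; · subst h5; decide
  by_cases h6 : c = ';'; · subst h6; decide
  by_cases h7 : c = '<'; · subst h7; decide
  by_cases h8 : c = '='; · subst h8; decide
  by_cases h9 : c = '>'; · subst h9; decide
  by_cases h10 : c = ':'; · subst h10; decide
  by_cases h11 : c = '*'; · subst h11; decide
  by_cases h12 : c = '&'; · subst h12; decide
  by_cases h13 : c = '('; · subst h13; decide
  by_cases h14 : c = ')'; · subst h14; decide
  by_cases h15 : c = '@'; · subst h15; decide
  by_cases h16 : c = '!'; · subst h16; decide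
  by_cases h17 : c = '#'; · subst h17; decide
  simp [chainA, replace_single, mpsTable,
    h1, h2, h3, h4, h5, h6, h7, h8, h9, h10, h11, h12, h13, h14, h15, h16, h17]

theorem chainA_eq (L : List Char) : chainA L = L.flatMap mpsTable := by
  induction L with
  | nil => decide
  | cons c t ih =>
    have : (c :: t) = [c] ++ t := rfl
    rw [this, chainA_append, ih, chainA_single, List.flatMap_append]
    simp


-- ===== VERDICT (by name: the statement is the Claim_ definition above) =====
theorem make_path_safe_spec : Claim_equal_make_path_safe := by
  intro path _
  unfold Spec_make_path_safe
  have h := toList_A path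
  rw [chainA_eq] at h
  calc make_path_safe path
      = String.ofList (make_path_safe path).toList := (String.ofList_toList).symm
    _ = make_path_safe_alt path := by rw [h]; rfl
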